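-- pv_equiv track=rewrite | github.com/serverx-org/SERVER-X-ARCHIVES | hackerearth-vignan/III-SEM/data-structures-internal/test2.py | row_wise_max_elements
-- ===== SOURCE A (Python) =====
-- def heapify(arr, n, i):
--     largest = i
--     left_child, right_child = 2 * i + 1, 2 * i + 2
--
--     largest = left_child if left_child < n and arr[left_child] > arr[largest] else largest
--     largest = right_child if right_child < n and arr[right_child] > arr[largest] else largest
--
--     if largest != i:
--         arr[i], arr[largest] = arr[largest], arr[i]
--         heapify(arr, n, largest)
--
-- def row_wise_max_elements(arr):
--     n, start_idx = len(arr), (len(arr) // 2) - 1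
--
--     for i in range(start_idx, -1, -1):
--         heapify(arr, n, i)
--
--     result, level_size = [], 1
--     while level_size <= n:
--         result.append(max(arr[level_size - 1: min(2 * level_size - 1, n)]))
--         level_size *= 2
--
--     return result
-- ===== SOURCE B (Python) =====
-- def row_wise_max_elements(arr):
--     # Same return value as A (and the same in-place max-heapification of arr):
--     # iterative larger-child sift-down instead of recursive heapify, and one
--     # running-max pass over the heap instead of per-level slicing.
--     n = len(arr)
--     for start in range(n // 2 - 1, -1, -1):
--         j = start
--         while 2 * j + 1 < n:
--             c = 2 * j + 1
--             if c + 1 < n and arr[c + 1] > arr[c]: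
--                 c += 1
--             if arr[c] <= arr[j]:
--                 break
--             arr[j], arr[c] = arr[c], arr[j]
--             j = c
--     result = []
--     best = None
--     cap, cnt = 1, 0
--     for v in arr:
--         best = v if cnt == 0 else max(best, v)
--         cnt += 1
--         if cnt == cap:
--             result.append(best)
--             cap, cnt = 2 * cap, 0
--     if cnt:
--         result.append(best)
--     return result
-- ===== Notes on version B (the rewrite author's own statement) =====
-- stated objective: alternative
-- what changed: Replaces the recursive heapify (two chained conditional selections, recursing on the moved index) by an iterative larger-child sift-down loop, and replaces the per-level slice-and-max scan with doubling slice bounds by a single running-max pass over the heap that flushes at level boundaries tracked by a capacity counter.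
import Mathlib
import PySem

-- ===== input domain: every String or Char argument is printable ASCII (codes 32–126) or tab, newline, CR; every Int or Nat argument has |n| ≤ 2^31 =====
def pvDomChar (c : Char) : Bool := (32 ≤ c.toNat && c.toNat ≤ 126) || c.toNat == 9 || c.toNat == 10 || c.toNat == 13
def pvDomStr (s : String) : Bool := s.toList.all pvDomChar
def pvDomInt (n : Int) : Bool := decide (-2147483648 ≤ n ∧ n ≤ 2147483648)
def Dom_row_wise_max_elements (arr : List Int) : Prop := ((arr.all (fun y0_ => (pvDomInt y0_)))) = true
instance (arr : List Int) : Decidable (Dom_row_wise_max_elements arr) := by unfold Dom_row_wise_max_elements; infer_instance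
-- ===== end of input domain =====

-- B replaces A's recursive heapify by an iterative larger-child sift-down and the
-- per-level slice/max scan by one running-max pass; A mutates its argument in place
-- (B performs the same mutation), the equivalence proved here is about the return value.

-- ===== PORT A =====

-- Python's simultaneous `arr[i], arr[j] = arr[j], arr[i]` (both indices always in range here)
def pvSwap (arr : List Int) (i j : Nat) : List Int :=
  (arr.set i (arr.getD j 0)).set j (arr.getD i 0)

-- the two `largest = … if … else largest` lines of heapify
def pvLargest (arr : List Int) (n i : Nat) : Nat :=
  let largest := i
  let largest := if 2*i+1 < n ∧ arr.getD (2*i+1) 0 > arr.getD largest 0 then 2*i+1 else largest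
  let largest := if 2*i+2 < n ∧ arr.getD (2*i+2) 0 > arr.getD largest 0 then 2*i+2 else largest
  largest

theorem pvLargest_lt (arr : List Int) (n i : Nat) (h : pvLargest arr n i ≠ i) :
    i < pvLargest arr n i ∧ pvLargest arr n i < n := by
  unfold pvLargest at *; dsimp only at *; split_ifs at * <;> omega

-- recursive heapify; all reads are guarded to be in range, so getD is exact
def heapifyA (arr : List Int) (n i : Nat) : List Int :=
  if h : pvLargest arr n i ≠ i then heapifyA (pvSwap arr i (pvLargest arr n i)) n (pvLargest arr n i)
  else arr
termination_by n - i
decreasing_by have := pvLargest_lt arr n i h; omega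

-- for i in range(n//2 - 1, -1, -1): heapify(arr, n, i)   (buildA arr n k runs i = k-1 … 0)
def buildA (arr : List Int) (n : Nat) : Nat → List Int
  | 0 => arr
  | k+1 => buildA (heapifyA arr n k) n k

-- while level_size <= n: append(max(arr[ls-1 : min(2*ls-1, n)])); ls *= 2
-- (the 1 ≤ ls conjunct only makes the recursion total; Python's ls is always ≥ 1;
--  both slice bounds are ≥ 0 here, so take/drop is Python's slice; the slice is
--  nonempty whenever the guard holds, so Python's max never raises and getD 0 is exact)
def levelsA (arr : List Int) (n ls : Nat) : List Int :=
  if 1 ≤ ls ∧ ls ≤ n then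
    (PySem.List.max? ((arr.take (min (2*ls-1) n)).drop (ls-1)) (fun y => y)).getD 0
      :: levelsA arr n (2*ls)
  else []
termination_by n + 1 - ls
decreasing_by omega

def row_wise_max_elements (arr : List Int) : List Int :=
  levelsA (buildA arr arr.length (arr.length / 2)) arr.length 1

-- ===== PORT B =====

-- the larger in-bounds child of j (left preferred on ties)
def pvChild (arr : List Int) (n j : Nat) : Nat :=
  if 2*j+2 < n ∧ arr.getD (2*j+2) 0 > arr.getD (2*j+1) 0 then 2*j+2 else 2*j+1

theorem pvChild_lt (arr : List Int) (n j : Nat) (h : 2*j+1 < n) :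
    j < pvChild arr n j ∧ pvChild arr n j < n := by
  unfold pvChild; split_ifs <;> omega

-- iterative sift-down: pick the larger in-bounds child, stop if it is not above the node
def siftB (arr : List Int) (n j : Nat) : List Int :=
  if h : 2*j+1 < n then
    if arr.getD (pvChild arr n j) 0 ≤ arr.getD j 0 then arr
    else siftB (pvSwap arr j (pvChild arr n j)) n (pvChild arr n j)
  else arr
termination_by n - j
decreasing_by have := pvChild_lt arr n j h; omega

def buildB (arr : List Int) (n : Nat) : Nat → List Int
  | 0 => arr
  | k+1 => buildB (siftB arr n k) n k

-- one running-max pass: state (result, best, cap, cnt)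
def scanB : List Int → List Int → Option Int → Nat → Nat → List Int
  | [], res, best, _cap, cnt => if cnt ≠ 0 then res ++ [best.getD 0] else res
  | v :: rest, res, best, cap, cnt =>
      let b := if cnt = 0 then v else max (best.getD 0) v
      if cnt + 1 = cap then scanB rest (res ++ [b]) none (2*cap) 0
      else scanB rest res (some b) cap (cnt+1)

def row_wise_max_elements_alt (arr : List Int) : List Int :=
  scanB (buildB arr arr.length (arr.length / 2)) [] none 1 0

-- ===== PRECONDITION & SPEC =====
def Spec_row_wise_max_elements (arr : List Int) (out : List Int) : Prop := out = row_wise_max_elements_alt arr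
instance (arr : List Int) (out : List Int) : Decidable (Spec_row_wise_max_elements arr out) := by unfold Spec_row_wise_max_elements; infer_instance

-- ===== CLAIM (what is proved, stated in full; the proofs are below) =====
def Claim_equal_row_wise_max_elements : Prop := ∀ (arr : List Int), Dom_row_wise_max_elements arr → Spec_row_wise_max_elements arr (row_wise_max_elements arr)

-- ===== LEMMAS AND PROOFS =====

-- both heaps coincide: A's two-conditional select equals B's larger-child select
-- when the left child is in bounds, A's selected index is B's: j if the larger
-- child is not above it, else that child
theorem largest_char (arr : List Int) (n j : Nat) (h1 : 2*j+1 < n) :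
    pvLargest arr n j =
      (if arr.getD (pvChild arr n j) 0 ≤ arr.getD j 0 then j else pvChild arr n j) := by
  unfold pvLargest pvChild
  dsimp only
  split_ifs <;> omega

theorem sift_eq (n : Nat) : ∀ (k : Nat) (arr : List Int) (j : Nat), n - j ≤ k →
    heapifyA arr n j = siftB arr n j := by
  intro k
  induction k with
  | zero =>
      intro arr j h
      have hL : pvLargest arr n j = j := by
        unfold pvLargest; dsimp only; split_ifs <;> omega
      rw [heapifyA, siftB, dif_neg (by omega : ¬ 2*j+1 < n)]
      simp [hL]
  | succ k ih =>
      intro arr j h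
      rw [heapifyA, siftB]
      by_cases h1 : 2*j+1 < n
      · rw [dif_pos h1, largest_char arr n j h1]
        by_cases hle : arr.getD (pvChild arr n j) 0 ≤ arr.getD j 0
        · simp only [if_pos hle]
          simp
        · have hcj := pvChild_lt arr n j h1
          simp only [if_neg hle]
          rw [dif_pos (show pvChild arr n j ≠ j from by omega)]
          exact ih _ _ (by omega)
      · have hL : pvLargest arr n j = j := by
          unfold pvLargest; dsimp only; split_ifs <;> omega
        rw [dif_neg h1]
        simp [hL]

theorem build_eq (n : Nat) : ∀ (k : Nat) (arr : List Int), buildA arr n k = buildB arr n k := by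
  intro k
  induction k with
  | zero => intro arr; rfl
  | succ k ih =>
      intro arr
      show buildA (heapifyA arr n k) n k = buildB (siftB arr n k) n k
      rw [sift_eq n (n - k) arr k le_rfl]
      exact ih _

-- common specification of the level-maxima phase
def chunkMax (cap : Nat) : List Int → List Int
  | [] => []
  | x :: t => (t.take (cap-1)).foldl max x :: chunkMax (2*cap) (t.drop (cap-1))
termination_by l => l.length
decreasing_by simp

theorem levels_eq : ∀ (fuel ls : Nat) (arr : List Int), 1 ≤ ls → arr.length + 1 - ls ≤ fuel →
    levelsA arr arr.length ls = chunkMax ls (arr.drop (ls-1)) := by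
  intro fuel
  induction fuel with
  | zero =>
      intro ls arr h1 hf
      rw [levelsA, if_neg (by omega : ¬ (1 ≤ ls ∧ ls ≤ arr.length))]
      rw [List.drop_eq_nil_of_le (by omega)]
      simp [chunkMax]
  | succ fuel ih =>
      intro ls arr h1 hf
      obtain ⟨m, rfl⟩ : ∃ m, ls = m + 1 := ⟨ls - 1, by omega⟩
      rw [levelsA]
      by_cases hls : m + 1 ≤ arr.length
      · rw [if_pos ⟨h1, hls⟩]
        obtain ⟨x, t, hxt⟩ : ∃ x t, arr.drop (m+1-1) = x :: t := by
          cases hcase : arr.drop (m+1-1) with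
          | nil =>
              have := congrArg List.length hcase
              simp at this; omega
          | cons x t => exact ⟨x, t, rfl⟩
        have hxt' : arr.drop m = x :: t := by simpa using hxt
        have hlen_t : t.length = arr.length - (m+1) := by
          have := congrArg List.length hxt'
          simp at this; omega
        have hslice : (arr.take (min (2*(m+1)-1) arr.length)).drop (m+1-1) = x :: t.take (m+1-1) := by
          rw [List.drop_take, hxt]
          have h2 : (x :: t).take (min (2*(m+1)-1) arr.length - (m+1-1)) = (x :: t).take (m+1) := by
            apply List.take_eq_take_iff.mpr
            simp [hlen_t]; omega
          rw [h2, List.take_succ_cons]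
          simp
        have hdrop : arr.drop (2*(m+1)-1) = t.drop (m+1-1) := by
          rw [show 2*(m+1)-1 = m + (m+1) from by omega, ← List.drop_drop, hxt',
              List.drop_succ_cons]
          simp
        rw [hslice, PySem.List.max?_id_cons, ih (2*(m+1)) arr (by omega) (by omega), hxt,
            hdrop, chunkMax]
        simp
      · rw [if_neg (by omega), List.drop_eq_nil_of_le (by omega)]
        simp [chunkMax]

theorem scan_both : ∀ (N : Nat) (l : List Int), l.length ≤ N →
    ((∀ (res : List Int) (cap : Nat), 1 ≤ cap →
        scanB l res none cap 0 = res ++ chunkMax cap l) ∧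
     (∀ (res : List Int) (b : Int) (cap cnt : Nat), 1 ≤ cnt → cnt < cap →
        scanB l res (some b) cap cnt =
          res ++ ((l.take (cap - cnt)).foldl max b :: chunkMax (2*cap) (l.drop (cap - cnt))))) := by
  intro N
  induction N with
  | zero =>
      intro l hl
      have hnil : l = [] := List.eq_nil_of_length_eq_zero (by omega)
      subst hnil
      constructor
      · intro res cap hc; simp [scanB, chunkMax]
      · intro res b cap cnt h1 h2
        rw [scanB, if_pos (by omega : cnt ≠ 0)]
        simp [chunkMax]
  | succ N ihN =>
      intro l hl
      cases l with
      | nil => exact ihN [] (by simp)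
      | cons v t =>
        have iht := ihN t (by simp at hl; omega)
        constructor
        · intro res cap hc
          rw [scanB]
          rw [if_pos rfl]
          by_cases hcap : 0 + 1 = cap
          · rw [if_pos hcap, iht.1 _ _ (by omega)]
            rw [show cap = 1 from by omega, chunkMax]
            simp
          · rw [if_neg hcap, iht.2 _ _ _ _ le_rfl (by omega), chunkMax]
        · intro res b cap cnt h1 h2
          rw [scanB]
          rw [if_neg (by omega : ¬ cnt = 0)]
          by_cases hcap : cnt + 1 = cap
          · rw [if_pos hcap, iht.1 _ _ (by omega)]
            rw [show cap - cnt = 1 from by omega]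
            simp
          · rw [if_neg hcap, iht.2 _ _ _ _ (by omega) (by omega)]
            rw [show cap - cnt = (cap - cnt - 1) + 1 from by omega, List.take_succ_cons,
                List.drop_succ_cons, List.foldl_cons]
            simp
            exact ⟨by congr 1, by congr 1⟩

theorem scan_none (l : List Int) (res : List Int) (cap : Nat) (hc : 1 ≤ cap) :
    scanB l res none cap 0 = res ++ chunkMax cap l :=
  (scan_both l.length l le_rfl).1 res cap hc

theorem heapify_length (n : Nat) : ∀ (k : Nat) (arr : List Int) (i : Nat), n - i ≤ k →
    (heapifyA arr n i).length = arr.length := by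
  intro k
  induction k with
  | zero =>
      intro arr i h
      rw [heapifyA]
      split_ifs with hL
      · have := pvLargest_lt arr n i hL; omega
      · rfl
  | succ k ih =>
      intro arr i h
      rw [heapifyA]
      split_ifs with hL
      · have := pvLargest_lt arr n i hL
        rw [ih _ _ (by omega)]
        simp [pvSwap]
      · rfl

theorem build_length (n : Nat) : ∀ (k : Nat) (arr : List Int),
    (buildA arr n k).length = arr.length := by
  intro k
  induction k with
  | zero => intro arr; rfl
  | succ k ih => intro arr; simp only [buildA, ih, heapify_length n (n - k) arr k le_rfl]

-- ===== VERDICT (by name: the statement is the Claim_ definition above) =====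
theorem row_wise_max_elements_spec : Claim_equal_row_wise_max_elements := by
  intro arr _
  unfold Spec_row_wise_max_elements row_wise_max_elements row_wise_max_elements_alt
  rw [← build_eq]
  set H := buildA arr arr.length (arr.length / 2) with hH
  have hlen : H.length = arr.length := build_length arr.length (arr.length / 2) arr
  rw [scan_none _ _ _ le_rfl]
  
  have h2 := levels_eq (H.length + 1) 1 H le_rfl (by omega)
  rw [hlen] at h2
  simpa using h2
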